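-- pv_equiv track=rewrite | github.com/losskatsu/codility | NumberSolitaire_02.py | solution
-- ===== SOURCE A (Python) =====
-- def solution(A):
--     # write your code in Python 3.6
--     N = len(A)
--     dp = [0]*N
--
--     for i in range(0, N):
--         if(i==0):
--             dp[0] = A[0]
--         elif((i>0) & (i<(N-1))):
--             dp[i] = max(dp[i-1], dp[i-1] + A[i])
--         else:
--             dp[i] = dp[i-1] + A[i]
--     return dp[N-1]
-- ===== SOURCE B (Python) =====
-- def solution(A):
--     # closed form: one accumulation over the middle elements instead of a DP table
--     if len(A) == 1:
--         return A[0]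
--     return A[0] + sum(max(0, x) for x in A[1:-1]) + A[-1]
-- ===== Notes on version B (the rewrite author's own statement) =====
-- stated objective: simpler
-- what changed: Replaces the N-entry DP table and index loop by a closed form: first element + sum of max(0,x) over the middle elements + last element (using max(d, d+x) = d + max(0,x)), with a single length-1 special case.
-- outside the precondition, e.g. on solution([]): A raises IndexError, B raises IndexError
import Mathlib
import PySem

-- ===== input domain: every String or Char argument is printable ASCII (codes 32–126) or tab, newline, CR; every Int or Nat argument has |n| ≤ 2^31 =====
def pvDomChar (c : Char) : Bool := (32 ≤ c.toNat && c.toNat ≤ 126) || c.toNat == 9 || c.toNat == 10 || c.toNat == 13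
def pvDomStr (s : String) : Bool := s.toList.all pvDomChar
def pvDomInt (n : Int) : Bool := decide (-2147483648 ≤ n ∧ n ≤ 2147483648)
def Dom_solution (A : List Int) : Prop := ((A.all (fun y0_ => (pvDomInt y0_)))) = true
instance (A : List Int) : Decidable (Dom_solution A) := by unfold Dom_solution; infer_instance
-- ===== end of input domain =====

-- B replaces A's DP table and index loop by a single closed-form accumulation; equal on all non-empty lists.

-- ===== PORT A =====
-- loop body of A's 'for i in range(0, N)' (dp is the mutable table)
def solStep (A : List Int) (N : Int) (dp : List Int) (i : Int) : List Int :=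
  if i == 0 then
    PySem.List.pySetD dp 0 (PySem.List.pyGetD A 0 0)
  else if 0 < i ∧ i < N - 1 then
    PySem.List.pySetD dp i
      (max (PySem.List.pyGetD dp (i-1) 0) (PySem.List.pyGetD dp (i-1) 0 + PySem.List.pyGetD A i 0))
  else
    PySem.List.pySetD dp i (PySem.List.pyGetD dp (i-1) 0 + PySem.List.pyGetD A i 0)

def solution (A : List Int) : Int :=
  let N : Int := PySem.List.len A
  let dp : List Int := PySem.List.pyRepeat [0] N
  let dp := (PySem.List.pyRange 0 N 1).foldl (solStep A N) dp
  PySem.List.pyGetD dp (N - 1) 0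

-- ===== PORT B =====
def solution_alt (A : List Int) : Int :=
  if PySem.List.len A == 1 then
    PySem.List.pyGetD A 0 0
  else
    PySem.List.pyGetD A 0 0
      + ((PySem.List.slice A (some 1) (some (-1))).map (fun x => max 0 x)).sum
      + PySem.List.pyGetD A (-1) 0

-- ===== PRECONDITION & SPEC =====
-- On the empty list both Pythons raise IndexError; Pre_ excludes exactly that.
def Pre_solution (A : List Int) : Prop := A ≠ []
instance (A : List Int) : Decidable (Pre_solution A) := by unfold Pre_solution; infer_instance
def pvWitness_solution : List Int := ([1, -2, 3])
def Spec_solution (A : List Int) (out : Int) : Prop := out = solution_alt A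
instance (A : List Int) (out : Int) : Decidable (Spec_solution A out) := by unfold Spec_solution; infer_instance

-- ===== CLAIM (what is proved, stated in full; the proofs are below) =====
def Claim_equal_solution : Prop := ∀ (A : List Int), Dom_solution A → Pre_solution A → Spec_solution A (solution A)

-- ===== LEMMAS AND PROOFS =====

-- dp[j] after the loop has passed index j (the DP recurrence, on Nat indices)
def vA (A : List Int) : Nat → Int
  | 0 => A.getD 0 0
  | j+1 => vA A j + (if j + 1 < A.length - 1 then max 0 (A.getD (j+1) 0) else A.getD (j+1) 0)

lemma loop_inv (A : List Int) (h1 : 1 ≤ A.length) :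
    ∀ k : Nat, k ≤ A.length →
      (List.range k).foldl (fun dp (j : Nat) => solStep A (A.length : Int) dp (j : Int))
          (List.replicate A.length 0)
        = (List.range k).map (vA A) ++ List.replicate (A.length - k) 0 := by
  intro k
  induction k with
  | zero => simp
  | succ k ih =>
    intro hk
    have hk' : k ≤ A.length := by omega
    rw [List.range_succ, List.foldl_append, ih hk', List.map_append, List.foldl_cons, List.foldl_nil]
    rcases Nat.eq_zero_or_pos k with hk0 | hkpos
    · subst hk0
      simp only [solStep, List.range_zero, List.map_nil, List.nil_append]
      rw [if_pos (by decide)]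
      rw [show (0:Int) = ((0:Nat):Int) from rfl, PySem.List.pySetD_natCast]
      obtain ⟨a, rest, rfl⟩ : ∃ a rest, A = a :: rest := by
        cases A with | nil => simp at h1 | cons a rest => exact ⟨a, rest, rfl⟩
      simp [vA, PySem.List.pyGetD_zero_cons, List.replicate_succ]
    · -- k ≥ 1: i == 0 is false
      have hne : ((k : Int) == 0) = false := by
        simp only [beq_eq_false_iff_ne]; omega
      simp only [solStep, hne, Bool.false_eq_true, if_false]
      have hread : PySem.List.pyGetD
          ((List.range k).map (vA A) ++ List.replicate (A.length - k) 0) ((k : Int) - 1) 0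
          = vA A (k - 1) := by
        have hcast : ((k : Int) - 1) = ((k - 1 : Nat) : Int) := by omega
        rw [hcast, PySem.List.pyGetD_natCast]
        rw [List.getD_eq_getElem?_getD, List.getElem?_append_left (by simp; omega)]
        simp [List.getElem?_map, List.getElem?_range (show k - 1 < k by omega)]
      have hrep : List.replicate (A.length - k) (0:Int)
          = 0 :: List.replicate (A.length - (k+1)) 0 := by
        rw [show A.length - k = (A.length - (k+1)) + 1 from by omega, List.replicate_succ]
      have hset : ∀ v : Int,
          PySem.List.pySetD ((List.range k).map (vA A) ++ List.replicate (A.length - k) 0)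
            ((k : Int)) v
          = (List.range k).map (vA A) ++ [v] ++ List.replicate (A.length - (k+1)) 0 := by
        intro v
        rw [PySem.List.pySetD_natCast, hrep, List.set_append_right _ _ (by simp)]
        simp
      have hA : PySem.List.pyGetD A (k : Int) 0 = A.getD k 0 := by
        rw [PySem.List.pyGetD_natCast]
      have hvsucc : vA A k = vA A (k - 1)
          + (if k < A.length - 1 then max 0 (A.getD k 0) else A.getD k 0) := by
        obtain ⟨j, rfl⟩ : ∃ j, k = j + 1 := ⟨k - 1, by omega⟩
        simp [vA]
      by_cases hmid : (0 : Int) < (k : Int) ∧ (k : Int) < (A.length : Int) - 1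
      · have hcond : k < A.length - 1 := by omega
        rw [if_pos hmid, hread, hA, hset]
        simp only [List.map_cons, List.map_nil]
        rw [hvsucc, if_pos hcond]
        rw [show max (vA A (k-1)) (vA A (k-1) + A.getD k 0)
            = vA A (k-1) + max 0 (A.getD k 0) from by omega]
      · have hcond : ¬ k < A.length - 1 := by omega
        rw [if_neg hmid, hread, hA, hset]
        simp only [List.map_cons, List.map_nil]
        rw [hvsucc, if_neg hcond]

lemma solution_eq_vA (A : List Int) (h1 : 1 ≤ A.length) :
    solution A = vA A (A.length - 1) := by
  unfold solution
  simp only [PySem.List.len_eq]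
  rw [PySem.List.pyRepeat_singleton]
  have htn : ((A.length : Int)).toNat = A.length := by omega
  rw [htn, PySem.List.pyRange_zero_natCast, List.foldl_map]
  rw [loop_inv A h1 A.length (le_refl _)]
  have hcast : ((A.length : Int) - 1) = ((A.length - 1 : Nat) : Int) := by omega
  rw [hcast, PySem.List.pyGetD_natCast]
  simp only [Nat.sub_self, List.replicate_zero, List.append_nil]
  rw [List.getD_eq_getElem?_getD]
  simp [List.getElem?_map, List.getElem?_range (show A.length - 1 < A.length by omega)]

-- vA on the middle part is the running sum of max(0, ·)
lemma vA_prefix (A : List Int) : ∀ j : Nat, j ≤ A.length - 2 →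
    vA A j = A.getD 0 0 + (((A.drop 1).take j).map (fun x => max 0 x)).sum := by
  intro j
  induction j with
  | zero => simp [vA]
  | succ j ih =>
    intro hj
    have hlt : j + 1 < A.length - 1 := by omega
    have hjlt : j < (A.drop 1).length := by simp; omega
    have hget : A.getD (j+1) 0 = (A.drop 1)[j] := by
      rw [List.getD_eq_getElem?_getD,
          List.getElem?_eq_getElem (show j + 1 < A.length by omega)]
      simp
    rw [vA, if_pos hlt, ih (by omega), hget]
    rw [List.take_add_one, List.getElem?_eq_getElem hjlt]
    simp
    omega

lemma slice_middle (A : List Int) (hne : A ≠ []) :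
    PySem.List.slice A (some 1) (some (-1)) = (A.drop 1).take (A.length - 2) := by
  have hl : 1 ≤ A.length := by cases A with | nil => exact absurd rfl hne | cons a t => simp
  simp [PySem.List.slice, PySem.List.clampIdx]
  rw [if_neg hne, show ((A.length : Int) + -1).toNat = A.length - 1 from by omega,
      min_eq_left hl]
  rw [show A.length - 1 - 1 = A.length - 2 from by omega, List.drop_one]

-- ===== VERDICT (by name: the statement is the Claim_ definition above) =====
theorem solution_spec : Claim_equal_solution := by
  intro A _ hpre
  unfold Spec_solution solution_alt
  have h1 : 1 ≤ A.length := by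
    cases A with | nil => exact absurd rfl hpre | cons a t => simp
  rw [solution_eq_vA A h1]
  by_cases hone : A.length = 1
  · have hc : (PySem.List.len A == 1) = true := by
      simp [PySem.List.len_eq, hone]
    rw [hc, if_pos rfl, hone]
    simp [vA, PySem.List.pyGetD_zero]
  · have h2 : 2 ≤ A.length := by omega
    have hc : (PySem.List.len A == 1) = false := by
      simp [PySem.List.len_eq]; omega
    rw [hc, if_neg (by simp)]
    obtain ⟨j, hj⟩ : ∃ j, A.length - 1 = j + 1 := ⟨A.length - 2, by omega⟩
    rw [hj, vA, if_neg (by omega)]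
    rw [vA_prefix A j (by omega), slice_middle A hpre]
    rw [show A.length - 2 = j from by omega]
    rw [PySem.List.pyGetD_zero, PySem.List.pyGetD_neg_one A 0 hpre,
        List.getLast_eq_getElem]
    rw [show A.getD (j+1) 0 = A[A.length - 1]'(by omega) from by
      rw [List.getD_eq_getElem?_getD, List.getElem?_eq_getElem (by omega)]
      simp only [Option.getD_some]
      congr 1
      omega]
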